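-- pv_equiv track=rewrite | github.com/castlejun-2/Algorithm | Programmers/Dynamic Programming/코딩 테스트 공부.py | solution
-- ===== SOURCE A (Python) =====
-- def solution(alp, cop, problems):
--     problems = sorted(problems,key=lambda x:(x[0],x[1]))
--     max_alp=max(list(zip(*problems))[0])
--     max_cop=max(list(zip(*problems))[1])
--     dp=[[10**9]*(max_cop+1) for _ in range(max_alp+1)]  #가능한 최대 시간은 10**9값으로 설정
--
--     alp=min(alp,max_alp)  #최대 알고력이 현재 알고력보다 낮은 경우를 대비
--     cop=min(cop,max_cop)  #최대 코딩력이 현재 코딩력보다 낮은 경우를 대비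
--
--     dp[alp][cop]=0  #기존 지식으로 풀 수 있는 문제는 0의 시간이 든다.
--
--     for i in range(alp,max_alp+1):
--         for j in range(cop,max_cop+1):
--             if i+1<=max_alp:                           #dp의 범위를 초과 할 수도 있으므로
--                 dp[i+1][j]=min(dp[i+1][j],dp[i][j]+1)  #1초 경과 시 해당 알고력과 코딩력으로 얻을 수 있는 값 저장
--             if j+1<=max_cop:
--                 dp[i][j+1]=min(dp[i][j+1],dp[i][j]+1)
--
--             for algo,code,al_rwd,cd_rwd,cost in problems: #각 문제를 풀 때 얻을 수 있는 알고력
--                 if i>=algo and j>=code: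
--                     next_alp=min(max_alp,i+al_rwd)        #dp의 범위를 초과 할 수도 있으므로
--                     next_cop=min(max_cop,j+cd_rwd)
--                     dp[next_alp][next_cop]=min(dp[next_alp][next_cop],dp[i][j]+cost)  #문제를 풀 때 얻는 알고력과 코딩력에 도달 가능한 시간의 최소값 저장
--     return dp[max_alp][max_cop]                           #최대 알고력과 최대 코딩력에 도달하는 최소시간 출력
-- ===== SOURCE B (Python) =====
-- def _pred_axis(i, lo, hi, th, rwd):
--     # cells x with lo <= x <= hi, x >= th and min(hi, x + rwd) == i
--     if i < hi:
--         x = i - rwd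
--         return [x] if x >= lo and x >= th else []
--     return list(range(max(lo, th, hi - rwd), hi + 1))
--
-- def solution(alp, cop, problems):
--     INF = 10 ** 9
--     max_alp = max(p[0] for p in problems)
--     max_cop = max(p[1] for p in problems)
--     alp = min(alp, max_alp)
--     cop = min(cop, max_cop)
--     val = {}
--     for i in range(alp, max_alp + 1):
--         for j in range(cop, max_cop + 1):
--             best = 0 if (i, j) == (alp, cop) else INF
--             if alp < i:
--                 best = min(best, val.get((i - 1, j), INF) + 1)
--             if cop < j:
--                 best = min(best, val.get((i, j - 1), INF) + 1)
--             for algo, code, al_rwd, cd_rwd, cost in problems: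
--                 for x in _pred_axis(i, alp, max_alp, algo, al_rwd):
--                     for y in _pred_axis(j, cop, max_cop, code, cd_rwd):
--                         if (x, y) != (i, j):
--                             best = min(best, val.get((x, y), INF) + cost)
--             val[(i, j)] = best
--     return val[(max_alp, max_cop)]
-- ===== Notes on version B (the rewrite author's own statement) =====
-- stated objective: alternative
-- what changed: B replaces A's push-style sweep (each cell relaxes its outgoing moves/problem edges into later dp cells, every cell written many times) by a pull-style DP that computes each cell exactly once as the min over its incoming edges, enumerating each problem's predecessor cells in closed form (a unique cell off the capped boundary, a range segment on it) and never sorting; Pre_ restricts to the task's natural domain (nonempty problems, rows of five non-negative ints, non-negative alp/cop), outside which A raises or relies on negative-index wraparound and negative-cost self-loops.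
-- outside the precondition, e.g. on solution(0, 0, [[0, 0, 0, 0, -3]]): A returns -3, B returns 0; on solution(-1, 0, [[2, 1, 1, 1, 1]]): A returns 1, B returns 4; on solution(0, 0, [[1, 1]]): A raises ValueError, B raises ValueError
import Mathlib
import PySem

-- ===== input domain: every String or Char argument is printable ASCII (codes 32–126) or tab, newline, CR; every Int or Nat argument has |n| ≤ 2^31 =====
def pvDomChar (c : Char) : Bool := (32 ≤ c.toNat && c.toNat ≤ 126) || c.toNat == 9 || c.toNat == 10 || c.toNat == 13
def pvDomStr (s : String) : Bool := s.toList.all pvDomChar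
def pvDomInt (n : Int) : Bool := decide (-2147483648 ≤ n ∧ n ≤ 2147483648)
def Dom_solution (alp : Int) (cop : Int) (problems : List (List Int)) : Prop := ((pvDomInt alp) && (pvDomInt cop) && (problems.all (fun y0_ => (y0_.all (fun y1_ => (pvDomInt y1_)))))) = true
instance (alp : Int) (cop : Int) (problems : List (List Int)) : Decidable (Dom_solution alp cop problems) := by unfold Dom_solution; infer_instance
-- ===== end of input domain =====

-- B replaces A's push-style grid sweep by a pull-style DP (each cell computed once from its
-- in-edges, problem predecessors enumerated in closed form); same values on the natural domain
-- stated by Pre_solution; not claimed faster.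

-- ===== PORT A =====
-- dp[i][j] read / write on the 2-D list grid; exact for Python indices that are in range after
-- the usual negative-index rule (pyGetD/pySetD); where Python would raise IndexError the read
-- returns a junk default and the write is a no-op — such inputs are outside Pre_solution.
def pyGet2 (dp : List (List Int)) (i j : Int) : Int :=
  PySem.List.pyGetD (PySem.List.pyGetD dp i []) j 0

def pySet2 (dp : List (List Int)) (i j : Int) (v : Int) : List (List Int) :=
  PySem.List.pySetD dp i (PySem.List.pySetD (PySem.List.pyGetD dp i []) j v)

-- one problem relaxation of A's innermost loop (a row that is not 5 ints: Python raises
-- the unpacking ValueError there, outside Pre_solution)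
def aProb (max_alp max_cop i j : Int) (dp : List (List Int)) (p : List Int) : List (List Int) :=
  match p with
  | [algo, code, al_rwd, cd_rwd, cost] =>
    if algo ≤ i ∧ code ≤ j then
      let next_alp := min max_alp (i + al_rwd)
      let next_cop := min max_cop (j + cd_rwd)
      pySet2 dp next_alp next_cop (min (pyGet2 dp next_alp next_cop) (pyGet2 dp i j + cost))
    else dp
  | _ => dp

-- body of A's inner loop over j (verbatim: the two 1-second moves, then every problem)
def aBody (max_alp max_cop : Int) (ps : List (List Int)) (dp : List (List Int)) (i j : Int) : List (List Int) :=
  let dp := if i + 1 ≤ max_alp then pySet2 dp (i+1) j (min (pyGet2 dp (i+1) j) (pyGet2 dp i j + 1)) else dp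
  let dp := if j + 1 ≤ max_cop then pySet2 dp i (j+1) (min (pyGet2 dp i (j+1)) (pyGet2 dp i j + 1)) else dp
  ps.foldl (aProb max_alp max_cop i j) dp

def solution (alp : Int) (cop : Int) (problems : List (List Int)) : Int :=
  -- problems = sorted(problems, key=lambda x: (x[0], x[1]))  (x[0]/x[1] raise on short rows: outside Pre_solution)
  let ps := PySem.List.sorted2 problems (fun x => PySem.List.pyGetD x 0 0) (fun x => PySem.List.pyGetD x 1 0)
  -- max(list(zip(*problems))[k]) = max of column k on rectangular input; [] raises IndexError (outside Pre_solution)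
  let max_alp := (PySem.List.max? (ps.map (fun p => PySem.List.pyGetD p 0 0)) (fun v => v)).getD 0
  let max_cop := (PySem.List.max? (ps.map (fun p => PySem.List.pyGetD p 1 0)) (fun v => v)).getD 0
  let dp : List (List Int) := List.replicate (max_alp+1).toNat (List.replicate (max_cop+1).toNat (10^9))
  let alp := min alp max_alp
  let cop := min cop max_cop
  let dp := pySet2 dp alp cop 0
  let dp := (PySem.List.pyRange alp (max_alp+1) 1).foldl (fun dp i =>
              (PySem.List.pyRange cop (max_cop+1) 1).foldl (fun dp j =>
                aBody max_alp max_cop ps dp i j) dp) dp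
  pyGet2 dp max_alp max_cop

-- ===== PORT B =====
-- cells x with lo <= x <= hi, x >= th and min(hi, x + rwd) == i  (Source B's _pred_axis)
def predAxis (i lo hi th rwd : Int) : List Int :=
  if i < hi then (if lo ≤ i - rwd ∧ th ≤ i - rwd then [i - rwd] else [])
  else PySem.List.pyRange (max (max lo th) (hi - rwd)) (hi + 1) 1

-- one problem of Source B's per-cell pull (a row that is not 5 ints: Python raises the
-- unpacking ValueError there, outside Pre_solution)
def bProb (alp cop max_alp max_cop i j : Int) (val : PySem.Dict (Int × Int) Int)
    (best : Int) (p : List Int) : Int :=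
  match p with
  | [algo, code, al_rwd, cd_rwd, cost] =>
    (predAxis i alp max_alp algo al_rwd).foldl (fun best x =>
      (predAxis j cop max_cop code cd_rwd).foldl (fun best y =>
        if ¬((x, y) = (i, j)) then min best (val.getD (x, y) (10^9) + cost) else best) best) best
  | _ => best

-- Source B's per-cell pull: min over the incoming moves and each problem's predecessor cells
def bBest (alp cop max_alp max_cop : Int) (problems : List (List Int))
    (val : PySem.Dict (Int × Int) Int) (i j : Int) : Int :=
  let INF : Int := 10^9
  let best : Int := if i = alp ∧ j = cop then 0 else INF
  let best := if alp < i then min best (val.getD (i-1, j) INF + 1) else best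
  let best := if cop < j then min best (val.getD (i, j-1) INF + 1) else best
  problems.foldl (bProb alp cop max_alp max_cop i j val) best

def solution_alt (alp : Int) (cop : Int) (problems : List (List Int)) : Int :=
  -- max(p[0] for p in problems): raises on empty problems / short rows (outside Pre_solution)
  let max_alp := (PySem.List.max? (problems.map (fun p => PySem.List.pyGetD p 0 0)) (fun v => v)).getD 0
  let max_cop := (PySem.List.max? (problems.map (fun p => PySem.List.pyGetD p 1 0)) (fun v => v)).getD 0
  let alp := min alp max_alp
  let cop := min cop max_cop
  let val : PySem.Dict (Int × Int) Int := PySem.Dict.empty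
  let val := (PySem.List.pyRange alp (max_alp+1) 1).foldl (fun val i =>
               (PySem.List.pyRange cop (max_cop+1) 1).foldl (fun val j =>
                 val.insert (i, j) (bBest alp cop max_alp max_cop problems val i j)) val) val
  val.getD (max_alp, max_cop) 0

-- ===== PRECONDITION & SPEC =====
-- Pre_solution is the task's natural domain (nonempty problem list, rows of five non-negative
-- ints, non-negative initial powers).  Outside it A raises (empty list, rows not of length 5,
-- a start so negative it underflows the grid) or returns values produced by Python's
-- negative-index wraparound / negative-cost self-loops, which B does not reproduce.
def Pre_solution (alp : Int) (cop : Int) (problems : List (List Int)) : Prop :=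
  problems ≠ [] ∧ 0 ≤ alp ∧ 0 ≤ cop ∧ ∀ p ∈ problems, p.length = 5 ∧ ∀ v ∈ p, 0 ≤ v

instance (alp : Int) (cop : Int) (problems : List (List Int)) : Decidable (Pre_solution alp cop problems) := by
  unfold Pre_solution; infer_instance

def pvWitness_solution : Int × Int × List (List Int) := (0, 0, [[1, 1, 2, 1, 3], [2, 2, 1, 1, 1]])

def Spec_solution (alp : Int) (cop : Int) (problems : List (List Int)) (out : Int) : Prop := out = solution_alt alp cop problems
instance (alp : Int) (cop : Int) (problems : List (List Int)) (out : Int) : Decidable (Spec_solution alp cop problems out) := by unfold Spec_solution; infer_instance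

-- ===== CLAIM (what is proved, stated in full; the proofs are below) =====
def Claim_equal_solution : Prop := ∀ (alp : Int) (cop : Int) (problems : List (List Int)), Dom_solution alp cop problems → Pre_solution alp cop problems → Spec_solution alp cop problems (solution alp cop problems)

-- ===== LEMMAS AND PROOFS =====



-- proof-side vocabulary ------------------------------------------------------

-- rows are 5 non-negative ints
def Wf (ps : List (List Int)) : Prop := ∀ p ∈ ps, p.length = 5 ∧ ∀ v ∈ p, 0 ≤ v

-- the iterated sub-grid
def Rect (L1 L2 H1 H2 : Int) (v : Int × Int) : Prop :=
  L1 ≤ v.1 ∧ v.1 ≤ H1 ∧ L2 ≤ v.2 ∧ v.2 ≤ H2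

-- row-major order
def rmlt (u v : Int × Int) : Prop := u.1 < v.1 ∨ (u.1 = v.1 ∧ u.2 < v.2)

-- grid well-formedness
def Shape (H1 H2 : Int) (dp : List (List Int)) : Prop :=
  dp.length = (H1+1).toNat ∧ ∀ r ∈ dp, r.length = (H2+1).toNat

def initV (L1 L2 : Int) (v : Int × Int) : Int := if v = (L1, L2) then 0 else 10^9

-- contributions of the problem edges of u that land on v, when u's dp value is b
def probContribs (H1 H2 : Int) (ps : List (List Int)) (b : Int) (u v : Int × Int) : List Int :=
  ps.filterMap (fun p => match p with
    | [algo, code, al, cd, cost] =>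
      if (algo ≤ u.1 ∧ code ≤ u.2) ∧ (min H1 (u.1+al), min H2 (u.2+cd)) = v then some (b + cost)
      else none
    | _ => none)

-- all contributions of the out-edges of u that land on v, when u's dp value is b
def contribs (H1 H2 : Int) (ps : List (List Int)) (b : Int) (u v : Int × Int) : List Int :=
  (if u.1 + 1 ≤ H1 ∧ v = (u.1 + 1, u.2) then [b + 1] else []) ++
  (if u.2 + 1 ≤ H2 ∧ v = (u.1, u.2 + 1) then [b + 1] else []) ++
  probContribs H1 H2 ps b u v

-- the closed formula for the grid after the cells of P have been processed
def FF (L1 L2 H1 H2 : Int) (ps : List (List Int)) (f : Int × Int → Int)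
    (P : List (Int × Int)) (v : Int × Int) : Int :=
  (P.flatMap (fun u => contribs H1 H2 ps (f u) u v)).foldl min (initV L1 L2 v)

-- the processed cells, in row-major order
def cells (L1 L2 H1 H2 : Int) : List (Int × Int) :=
  (PySem.List.pyRange L1 (H1+1) 1).flatMap
    (fun i => (PySem.List.pyRange L2 (H2+1) 1).map (fun j => (i, j)))

-- the joint invariant of the two sweeps after processing the prefix P
def SweepInv (L1 L2 H1 H2 : Int) (ps : List (List Int)) (P : List (Int × Int))
    (dp : List (List Int)) (val : PySem.Dict (Int × Int) Int) (f : Int × Int → Int) : Prop :=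
  Shape H1 H2 dp ∧ (∀ u ∈ P, val.get? u = some (f u)) ∧
  (∀ v : Int × Int, Rect L1 L2 H1 H2 v → pyGet2 dp v.1 v.2 = FF L1 L2 H1 H2 ps f P v)

-- min-fold toolbox -----------------------------------------------------------

theorem le_foldl_min (a b : Int) (l : List Int) (h1 : b ≤ a) (h2 : ∀ x ∈ l, b ≤ x) :
    b ≤ l.foldl min a := by
  induction l generalizing a with
  | nil => exact h1
  | cons x t ih =>
      exact ih (min a x) (le_min h1 (h2 x (by simp))) (fun y hy => h2 y (by simp [hy]))

theorem foldl_min_eq_self (a : Int) (l : List Int) (h : ∀ x ∈ l, a ≤ x) :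
    l.foldl min a = a :=
  le_antisymm (PySem.List.foldl_min_le l a).1 (le_foldl_min a a l le_rfl h)

theorem foldl_min_mem_equiv (a : Int) (l1 l2 : List Int)
    (h12 : ∀ x ∈ l1, x ∈ l2) (h21 : ∀ x ∈ l2, x ∈ l1) :
    l1.foldl min a = l2.foldl min a := by
  refine le_antisymm ?_ ?_
  · exact le_foldl_min a _ l2 (PySem.List.foldl_min_le l1 a).1
      (fun x hx => (PySem.List.foldl_min_le l1 a).2 x (h21 x hx))
  · exact le_foldl_min a _ l1 (PySem.List.foldl_min_le l2 a).1
      (fun x hx => (PySem.List.foldl_min_le l2 a).2 x (h12 x hx))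

theorem foldl_if_min {α : Type} (l : List α) (a : Int) (P : α → Prop) [DecidablePred P]
    (g : α → Int) :
    l.foldl (fun s x => if P x then min s (g x) else s) a =
      (l.filterMap (fun x => if P x then some (g x) else none)).foldl min a := by
  induction l generalizing a with
  | nil => rfl
  | cons x t ih => by_cases h : P x <;> simp [h, ih]

theorem foldl_flat_min {α : Type} (l : List α) (a : Int) (step : Int → α → Int)
    (h : α → List Int) (hs : ∀ s x, x ∈ l → step s x = (h x).foldl min s) :
    l.foldl step a = (l.flatMap h).foldl min a := by
  induction l generalizing a with
  | nil => rfl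
  | cons x t ih =>
      simp only [List.foldl_cons, List.flatMap_cons, List.foldl_append]
      rw [hs a x (by simp)]
      exact ih _ (fun s y hy => hs s y (by simp [hy]))

-- grid toolbox ---------------------------------------------------------------

theorem pyGetD_toNat {α : Type} (xs : List α) (n : Int) (d : α) (h : 0 ≤ n) :
    PySem.List.pyGetD xs n d = (xs[n.toNat]?).getD d := by
  rw [show n = ((n.toNat : Nat) : Int) by omega, PySem.List.pyGetD_natCast, List.getD_eq_getElem?_getD]
  have h2 : ((n.toNat : Nat) : Int).toNat = n.toNat := by omega
  rw [h2]

theorem shape_replicate (H1 H2 : Int) :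
    Shape H1 H2 (List.replicate (H1+1).toNat (List.replicate (H2+1).toNat (10^9 : Int))) := by
  constructor
  · simp
  · intro r hr
    simp only [List.mem_replicate] at hr
    simp [hr.2]

theorem pyGet2_replicate (H1 H2 a b c : Int) (ha : 0 ≤ a) (ha2 : a ≤ H1) (hb : 0 ≤ b) (hb2 : b ≤ H2) :
    pyGet2 (List.replicate (H1+1).toNat (List.replicate (H2+1).toNat c)) a b = c := by
  unfold pyGet2
  rw [pyGetD_toNat _ _ _ ha, List.getElem?_replicate, if_pos (by omega)]
  simp only [Option.getD_some]
  rw [pyGetD_toNat _ _ _ hb, List.getElem?_replicate, if_pos (by omega)]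
  rfl

theorem shape_pySet2 (H1 H2 i j v : Int) (dp : List (List Int)) (hs : Shape H1 H2 dp)
    (hi : 0 ≤ i) (hi2 : i ≤ H1) (hj : 0 ≤ j) :
    Shape H1 H2 (pySet2 dp i j v) := by
  obtain ⟨h1, h2⟩ := hs
  unfold pySet2
  rw [PySem.List.pySetD_of_nonneg _ _ hi]
  constructor
  · simp [h1]
  · intro r hr
    rcases List.mem_or_eq_of_mem_set hr with h | h
    · exact h2 r h
    · subst h
      rw [PySem.List.pySetD_of_nonneg _ _ (by omega), List.length_set]
      apply h2
      apply PySem.List.pyGetD_mem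
      unfold PySem.Raise.InRange
      omega

theorem pyGet2_pySet2 (H1 H2 i j a b v : Int) (dp : List (List Int)) (hs : Shape H1 H2 dp)
    (hi : 0 ≤ i) (hi2 : i ≤ H1) (hj : 0 ≤ j) (hj2 : j ≤ H2)
    (ha : 0 ≤ a) (ha2 : a ≤ H1) (hb : 0 ≤ b) (hb2 : b ≤ H2) :
    pyGet2 (pySet2 dp i j v) a b = if a = i ∧ b = j then v else pyGet2 dp a b := by
  obtain ⟨h1, h2⟩ := hs
  have hRmem : PySem.List.pyGetD dp i ([] : List Int) ∈ dp := by
    apply PySem.List.pyGetD_mem; unfold PySem.Raise.InRange; omega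
  have hRlen : (PySem.List.pyGetD dp i ([] : List Int)).length = (H2+1).toNat := h2 _ hRmem
  have hilt : i.toNat < dp.length := by omega
  have hjlt : j.toNat < (PySem.List.pyGetD dp i ([] : List Int)).length := by omega
  unfold pySet2 pyGet2
  rw [PySem.List.pySetD_of_nonneg _ _ hi, PySem.List.pySetD_of_nonneg _ _ hj]
  rw [pyGetD_toNat _ _ _ ha, List.getElem?_set]
  by_cases hai : a = i
  · subst hai
    simp only [if_pos rfl, hilt, if_pos, Option.getD_some]
    rw [pyGetD_toNat _ _ _ hb, List.getElem?_set]
    by_cases hbj : b = j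
    · subst hbj
      simp [hjlt]
    · have hne : j.toNat = b.toNat ↔ False := by simp; omega
      simp only [hne, if_false]
      rw [pyGetD_toNat dp a ([] : List Int) ha, pyGetD_toNat _ b (0:Int) hb]
      simp [hbj]
  · have hne : i.toNat = a.toNat ↔ False := by simp; omega
    simp only [hne, if_false, if_neg (by tauto : ¬ (a = i ∧ b = j))]
    rw [pyGetD_toNat dp a ([] : List Int) ha]

-- cells toolbox --------------------------------------------------------------

theorem mem_cells (L1 L2 H1 H2 : Int) (u : Int × Int) :
    u ∈ cells L1 L2 H1 H2 ↔ Rect L1 L2 H1 H2 u := by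
  obtain ⟨u1, u2⟩ := u
  simp only [cells, List.mem_flatMap, List.mem_map, PySem.List.mem_pyRange_one, Rect, Prod.mk.injEq]
  constructor
  · rintro ⟨i, hi, j, hj, rfl, rfl⟩; omega
  · rintro ⟨h1, h2, h3, h4⟩; exact ⟨u1, by omega, u2, by omega, rfl, rfl⟩

theorem pairwise_cells (L1 L2 H1 H2 : Int) :
    (cells L1 L2 H1 H2).Pairwise rmlt := by
  unfold cells
  rw [List.pairwise_flatMap]
  constructor
  · intro i _
    rw [List.pairwise_map]
    exact (PySem.List.pairwise_lt_pyRange_one L2 (H2+1)).imp (fun h => Or.inr ⟨rfl, h⟩)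
  · exact (PySem.List.pairwise_lt_pyRange_one L1 (H1+1)).imp
      (fun h => by
        rintro x hx y hy
        simp only [List.mem_map] at hx hy
        obtain ⟨j1, _, rfl⟩ := hx
        obtain ⟨j2, _, rfl⟩ := hy
        exact Or.inl h)

theorem split_cells (L1 L2 H1 H2 : Int) (P rest : List (Int × Int)) (c : Int × Int)
    (hsplit : cells L1 L2 H1 H2 = P ++ c :: rest) :
    Rect L1 L2 H1 H2 c ∧ c ∉ P ∧ (∀ u, u ∈ P ↔ Rect L1 L2 H1 H2 u ∧ rmlt u c) := by
  have hpw : (P ++ c :: rest).Pairwise rmlt := hsplit ▸ pairwise_cells L1 L2 H1 H2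
  rw [List.pairwise_append] at hpw
  obtain ⟨hpP, hpcr, hcross⟩ := hpw
  have hirr : ∀ u : Int × Int, ¬ rmlt u u := by
    rintro ⟨a, b⟩ h; simp [rmlt] at h
  have hmem : ∀ u : Int × Int, u ∈ cells L1 L2 H1 H2 ↔ u ∈ P ++ c :: rest := fun u => by rw [hsplit]
  have hRc : Rect L1 L2 H1 H2 c := (mem_cells L1 L2 H1 H2 c).mp ((hmem c).mpr (by simp))
  have hnot : c ∉ P := fun h => hirr c (hcross c h c (by simp))
  refine ⟨hRc, hnot, fun u => ⟨fun hu => ?_, fun ⟨hRu, hlt⟩ => ?_⟩⟩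
  · exact ⟨(mem_cells L1 L2 H1 H2 u).mp ((hmem u).mpr (by simp [hu])),
      hcross u hu c (by simp)⟩
  · have : u ∈ P ++ c :: rest := (hmem u).mp ((mem_cells L1 L2 H1 H2 u).mpr hRu)
    rw [List.mem_append, List.mem_cons] at this
    rcases this with h | h | h
    · exact h
    · exact absurd (h ▸ hlt) (hirr c)
    · exfalso
      have := List.rel_of_pairwise_cons hpcr h
      obtain ⟨u1, u2⟩ := u; obtain ⟨c1, c2⟩ := c
      unfold rmlt at hlt this; simp at hlt this; omega

-- FF toolbox -----------------------------------------------------------------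

theorem FF_congr (L1 L2 H1 H2 : Int) (ps : List (List Int)) (f f' : Int × Int → Int)
    (P : List (Int × Int)) (v : Int × Int) (h : ∀ u ∈ P, f u = f' u) :
    FF L1 L2 H1 H2 ps f P v = FF L1 L2 H1 H2 ps f' P v := by
  unfold FF
  congr 1
  exact List.flatMap_congr (fun u hu => by rw [h u hu])

theorem FF_snoc (L1 L2 H1 H2 : Int) (ps : List (List Int)) (f : Int × Int → Int)
    (P : List (Int × Int)) (c v : Int × Int) :
    FF L1 L2 H1 H2 ps f (P ++ [c]) v =
      (contribs H1 H2 ps (f c) c v).foldl min (FF L1 L2 H1 H2 ps f P v) := by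
  unfold FF
  simp [List.foldl_append]

-- A's body is a batch of min-updates -----------------------------------------


-- B's body computes the pull formula -----------------------------------------


-- the joint induction --------------------------------------------------------


-- assembling the two ports ---------------------------------------------------

theorem max_getD_perm (l1 l2 : List Int) (hp : l1.Perm l2) :
    ((PySem.List.max? l1 (fun v => v)).getD 0) = ((PySem.List.max? l2 (fun v => v)).getD 0) := by
  rcases o1 : PySem.List.max? l1 (fun v => v) with _ | m1
  · rw [(PySem.List.max?_eq_none_iff l1 _).mp o1] at hp
    rw [(PySem.List.max?_eq_none_iff l2 (fun v => v)).mpr hp.nil_eq.symm]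
  · rcases o2 : PySem.List.max? l2 (fun v => v) with _ | m2
    · exfalso
      have h2 : l2 = [] := (PySem.List.max?_eq_none_iff l2 _).mp o2
      subst h2
      have h1 : l1 = [] := hp.eq_nil
      subst h1
      rw [(PySem.List.max?_eq_none_iff ([] : List Int) (fun v => v)).mpr rfl] at o1
      cases o1
    · have h1 := PySem.List.max?_isMax o1
      have h2 := PySem.List.max?_isMax o2
      have m1m : m1 ∈ l2 := hp.mem_iff.mp (PySem.List.max?_mem o1)
      have m2m : m2 ∈ l1 := hp.mem_iff.mpr (PySem.List.max?_mem o2)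
      simp only [Option.getD_some]
      exact le_antisymm (h2 m1 m1m) (h1 m2 m2m)


theorem list5 (p : List Int) (h : p.length = 5) : ∃ a1 a2 a3 a4 a5, p = [a1,a2,a3,a4,a5] := by
  rcases p with _|⟨a1,_|⟨a2,_|⟨a3,_|⟨a4,_|⟨a5,_|⟨a6,t⟩⟩⟩⟩⟩⟩ <;> simp_all

theorem rect_bounds (L1 L2 H1 H2 : Int) (v : Int × Int) (h : Rect L1 L2 H1 H2 v)
    (hL1 : 0 ≤ L1) (hL2 : 0 ≤ L2) :
    0 ≤ v.1 ∧ v.1 ≤ H1 ∧ 0 ≤ v.2 ∧ v.2 ≤ H2 := by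
  obtain ⟨h1, h2, h3, h4⟩ := h; omega

theorem probs_fold (L1 L2 H1 H2 : Int) (c : Int × Int) (b : Int)
    (hL1 : 0 ≤ L1) (hL2 : 0 ≤ L2) (hc : Rect L1 L2 H1 H2 c) :
    ∀ (ps' : List (List Int)) (dp : List (List Int)), Wf ps' → Shape H1 H2 dp →
      pyGet2 dp c.1 c.2 = b →
      Shape H1 H2 (ps'.foldl (aProb H1 H2 c.1 c.2) dp) ∧
      pyGet2 (ps'.foldl (aProb H1 H2 c.1 c.2) dp) c.1 c.2 = b ∧
      (∀ v : Int × Int, Rect L1 L2 H1 H2 v →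
        pyGet2 (ps'.foldl (aProb H1 H2 c.1 c.2) dp) v.1 v.2 =
          (probContribs H1 H2 ps' b c v).foldl min (pyGet2 dp v.1 v.2)) := by
  intro ps'
  induction ps' with
  | nil => intro dp hwf hs hb; exact ⟨hs, hb, fun v hv => by simp [probContribs]⟩
  | cons p t ih =>
    intro dp hwf hs hb
    obtain ⟨hc1, hc2, hc3, hc4⟩ := rect_bounds L1 L2 H1 H2 c hc hL1 hL2
    obtain ⟨hp5, hpnn⟩ := hwf p (by simp)
    obtain ⟨a1, a2, a3, a4, a5, rfl⟩ := list5 p hp5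
    have h3 : 0 ≤ a3 := hpnn _ (by simp)
    have h4 : 0 ≤ a4 := hpnn _ (by simp)
    have h5 : 0 ≤ a5 := hpnn _ (by simp)
    have hwt : Wf t := fun q hq => hwf q (by simp [hq])
    simp only [List.foldl_cons, aProb]
    by_cases hth : a1 ≤ c.1 ∧ a2 ≤ c.2
    · rw [if_pos hth]
      have hRt : Rect L1 L2 H1 H2 (min H1 (c.1 + a3), min H2 (c.2 + a4)) := by
        obtain ⟨k1, k2, k3, k4⟩ := hc; unfold Rect; constructor; omega; constructor; omega
        constructor; omega; omega
      obtain ⟨ht1, ht2, ht3, ht4⟩ := rect_bounds L1 L2 H1 H2 _ hRt hL1 hL2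
      have hs1 : Shape H1 H2 (pySet2 dp (min H1 (c.1 + a3)) (min H2 (c.2 + a4))
          (min (pyGet2 dp (min H1 (c.1 + a3)) (min H2 (c.2 + a4))) (pyGet2 dp c.1 c.2 + a5))) :=
        shape_pySet2 _ _ _ _ _ dp hs ht1 ht2 ht3
      have hget : ∀ x y : Int, 0 ≤ x → x ≤ H1 → 0 ≤ y → y ≤ H2 →
          pyGet2 (pySet2 dp (min H1 (c.1 + a3)) (min H2 (c.2 + a4))
            (min (pyGet2 dp (min H1 (c.1 + a3)) (min H2 (c.2 + a4))) (pyGet2 dp c.1 c.2 + a5))) x y =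
          if x = min H1 (c.1 + a3) ∧ y = min H2 (c.2 + a4) then
            min (pyGet2 dp (min H1 (c.1 + a3)) (min H2 (c.2 + a4))) (pyGet2 dp c.1 c.2 + a5)
          else pyGet2 dp x y := by
        intro x y hx hx2 hy hy2
        exact pyGet2_pySet2 H1 H2 _ _ x y _ dp ⟨hs.1, hs.2⟩ ht1 ht2 ht3 ht4 hx hx2 hy hy2
      have hcb : pyGet2 (pySet2 dp (min H1 (c.1 + a3)) (min H2 (c.2 + a4))
          (min (pyGet2 dp (min H1 (c.1 + a3)) (min H2 (c.2 + a4))) (pyGet2 dp c.1 c.2 + a5))) c.1 c.2 = b := by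
        rw [hget c.1 c.2 hc1 hc2 hc3 hc4]
        split_ifs with h
        · rw [← h.1, ← h.2, hb]; omega
        · exact hb
      obtain ⟨ihS, ihC, ihV⟩ := ih _ hwt hs1 hcb
      refine ⟨ihS, ihC, ?_⟩
      intro v hv
      obtain ⟨hv1, hv2, hv3, hv4⟩ := rect_bounds L1 L2 H1 H2 v hv hL1 hL2
      rw [ihV v hv]
      have hcontr : probContribs H1 H2 ([a1,a2,a3,a4,a5] :: t) b c v =
          (if (min H1 (c.1 + a3), min H2 (c.2 + a4)) = v then
            (b + a5) :: probContribs H1 H2 t b c v else probContribs H1 H2 t b c v) := by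
        unfold probContribs
        rw [List.filterMap_cons]
        split_ifs with hveq
        · simp [hth, hveq]
        · simp [hth, hveq]
      rw [hcontr]
      split_ifs with hveq
      · rw [List.foldl_cons]
        congr 1
        rw [hget v.1 v.2 hv1 hv2 hv3 hv4,
            if_pos (by rw [← hveq]; exact ⟨rfl, rfl⟩), ← hveq, hb]
      · congr 1
        rw [hget v.1 v.2 hv1 hv2 hv3 hv4,
            if_neg (fun hcomp => hveq (Prod.ext hcomp.1.symm hcomp.2.symm))]
    · rw [if_neg hth]
      obtain ⟨ihS, ihC, ihV⟩ := ih dp hwt hs hb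
      refine ⟨ihS, ihC, ?_⟩
      intro v hv
      rw [ihV v hv]
      congr 1
      unfold probContribs
      rw [List.filterMap_cons]
      simp [hth]

theorem move_spec (L1 L2 H1 H2 : Int) (dp : List (List Int)) (hs : Shape H1 H2 dp)
    (c t : Int × Int) (hL1 : 0 ≤ L1) (hL2 : 0 ≤ L2)
    (hc : Rect L1 L2 H1 H2 c) (ht : Rect L1 L2 H1 H2 t) (hne : t ≠ c) (w : Int) :
    Shape H1 H2 (pySet2 dp t.1 t.2 (min (pyGet2 dp t.1 t.2) (pyGet2 dp c.1 c.2 + w))) ∧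
    pyGet2 (pySet2 dp t.1 t.2 (min (pyGet2 dp t.1 t.2) (pyGet2 dp c.1 c.2 + w))) c.1 c.2 =
      pyGet2 dp c.1 c.2 ∧
    (∀ v : Int × Int, Rect L1 L2 H1 H2 v →
      pyGet2 (pySet2 dp t.1 t.2 (min (pyGet2 dp t.1 t.2) (pyGet2 dp c.1 c.2 + w))) v.1 v.2 =
        if v = t then min (pyGet2 dp v.1 v.2) (pyGet2 dp c.1 c.2 + w) else pyGet2 dp v.1 v.2) := by
  obtain ⟨hc1, hc2, hc3, hc4⟩ := rect_bounds L1 L2 H1 H2 c hc hL1 hL2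
  obtain ⟨ht1, ht2, ht3, ht4⟩ := rect_bounds L1 L2 H1 H2 t ht hL1 hL2
  have hget : ∀ v : Int × Int, Rect L1 L2 H1 H2 v →
      pyGet2 (pySet2 dp t.1 t.2 (min (pyGet2 dp t.1 t.2) (pyGet2 dp c.1 c.2 + w))) v.1 v.2 =
        if v = t then min (pyGet2 dp v.1 v.2) (pyGet2 dp c.1 c.2 + w) else pyGet2 dp v.1 v.2 := by
    intro v hv
    obtain ⟨hv1, hv2, hv3, hv4⟩ := rect_bounds L1 L2 H1 H2 v hv hL1 hL2
    rw [pyGet2_pySet2 H1 H2 t.1 t.2 v.1 v.2 _ dp hs ht1 ht2 ht3 ht4 hv1 hv2 hv3 hv4]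
    by_cases hvt : v = t
    · rw [if_pos ⟨by rw [hvt], by rw [hvt]⟩, if_pos hvt, hvt]
    · rw [if_neg (fun hcomp => hvt (Prod.ext hcomp.1 hcomp.2)), if_neg hvt]
  refine ⟨shape_pySet2 _ _ _ _ _ dp hs ht1 ht2 ht3, ?_, hget⟩
  rw [hget c hc, if_neg (fun h => hne h.symm)]

theorem aBody_spec' (L1 L2 H1 H2 : Int) (ps : List (List Int)) (dp : List (List Int))
    (c : Int × Int) (hwf : Wf ps) (hs : Shape H1 H2 dp)
    (hL1 : 0 ≤ L1) (hL2 : 0 ≤ L2) (hc : Rect L1 L2 H1 H2 c) :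
    Shape H1 H2 (aBody H1 H2 ps dp c.1 c.2) ∧
    (∀ v : Int × Int, Rect L1 L2 H1 H2 v →
      pyGet2 (aBody H1 H2 ps dp c.1 c.2) v.1 v.2 =
        (contribs H1 H2 ps (pyGet2 dp c.1 c.2) c v).foldl min (pyGet2 dp v.1 v.2)) := by
  obtain ⟨hc1, hc2, hc3, hc4⟩ := rect_bounds L1 L2 H1 H2 c hc hL1 hL2
  unfold aBody
  -- step 1: the (i+1, j) move
  have step1 :
      Shape H1 H2 (if c.1 + 1 ≤ H1 then pySet2 dp (c.1+1) c.2 (min (pyGet2 dp (c.1+1) c.2) (pyGet2 dp c.1 c.2 + 1)) else dp) ∧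
      pyGet2 (if c.1 + 1 ≤ H1 then pySet2 dp (c.1+1) c.2 (min (pyGet2 dp (c.1+1) c.2) (pyGet2 dp c.1 c.2 + 1)) else dp) c.1 c.2 = pyGet2 dp c.1 c.2 ∧
      (∀ v : Int × Int, Rect L1 L2 H1 H2 v →
        pyGet2 (if c.1 + 1 ≤ H1 then pySet2 dp (c.1+1) c.2 (min (pyGet2 dp (c.1+1) c.2) (pyGet2 dp c.1 c.2 + 1)) else dp) v.1 v.2 =
          (if c.1 + 1 ≤ H1 ∧ v = (c.1 + 1, c.2) then [pyGet2 dp c.1 c.2 + 1] else []).foldl min (pyGet2 dp v.1 v.2)) := by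
    by_cases h1 : c.1 + 1 ≤ H1
    · have hRt : Rect L1 L2 H1 H2 (c.1 + 1, c.2) := by
        obtain ⟨k1, k2, k3, k4⟩ := hc; exact ⟨by omega, by omega, k3, k4⟩
      have hne : (c.1 + 1, c.2) ≠ c := by
        intro h; have := congrArg Prod.fst h; simp at this
      obtain ⟨mS, mC, mV⟩ := move_spec L1 L2 H1 H2 dp hs c (c.1+1, c.2) hL1 hL2 hc hRt hne 1
      rw [if_pos h1]
      refine ⟨mS, mC, ?_⟩
      intro v hv
      rw [mV v hv]
      by_cases hveq : v = (c.1 + 1, c.2)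
      · rw [if_pos hveq, if_pos ⟨h1, hveq⟩]; rfl
      · rw [if_neg hveq, if_neg (fun h => hveq h.2)]; rfl
    · rw [if_neg h1]
      refine ⟨hs, rfl, ?_⟩
      intro v hv
      rw [if_neg (fun h => h1 h.1)]
      rfl
  obtain ⟨s1S, s1C, s1V⟩ := step1
  set dpA := (if c.1 + 1 ≤ H1 then pySet2 dp (c.1+1) c.2 (min (pyGet2 dp (c.1+1) c.2) (pyGet2 dp c.1 c.2 + 1)) else dp) with hdpA
  -- step 2: the (i, j+1) move
  have step2 :
      Shape H1 H2 (if c.2 + 1 ≤ H2 then pySet2 dpA c.1 (c.2+1) (min (pyGet2 dpA c.1 (c.2+1)) (pyGet2 dpA c.1 c.2 + 1)) else dpA) ∧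
      pyGet2 (if c.2 + 1 ≤ H2 then pySet2 dpA c.1 (c.2+1) (min (pyGet2 dpA c.1 (c.2+1)) (pyGet2 dpA c.1 c.2 + 1)) else dpA) c.1 c.2 = pyGet2 dp c.1 c.2 ∧
      (∀ v : Int × Int, Rect L1 L2 H1 H2 v →
        pyGet2 (if c.2 + 1 ≤ H2 then pySet2 dpA c.1 (c.2+1) (min (pyGet2 dpA c.1 (c.2+1)) (pyGet2 dpA c.1 c.2 + 1)) else dpA) v.1 v.2 =
          (if c.2 + 1 ≤ H2 ∧ v = (c.1, c.2 + 1) then [pyGet2 dp c.1 c.2 + 1] else []).foldl min (pyGet2 dpA v.1 v.2)) := by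
    by_cases h2 : c.2 + 1 ≤ H2
    · have hRt : Rect L1 L2 H1 H2 (c.1, c.2 + 1) := by
        obtain ⟨k1, k2, k3, k4⟩ := hc; exact ⟨k1, k2, by omega, by omega⟩
      have hne : (c.1, c.2 + 1) ≠ c := by
        intro h; have := congrArg Prod.snd h; simp at this
      obtain ⟨mS, mC, mV⟩ := move_spec L1 L2 H1 H2 dpA s1S c (c.1, c.2+1) hL1 hL2 hc hRt hne 1
      rw [if_pos h2]
      refine ⟨mS, by rw [mC, s1C], ?_⟩
      intro v hv
      rw [mV v hv]
      by_cases hveq : v = (c.1, c.2 + 1)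
      · rw [if_pos hveq, if_pos ⟨h2, hveq⟩, List.foldl_cons, List.foldl_nil, s1C]
      · rw [if_neg hveq, if_neg (fun h => hveq h.2)]; rfl
    · rw [if_neg h2]
      refine ⟨s1S, s1C, ?_⟩
      intro v hv
      rw [if_neg (fun h => h2 h.1)]
      rfl
  obtain ⟨s2S, s2C, s2V⟩ := step2
  set dpB := (if c.2 + 1 ≤ H2 then pySet2 dpA c.1 (c.2+1) (min (pyGet2 dpA c.1 (c.2+1)) (pyGet2 dpA c.1 c.2 + 1)) else dpA) with hdpB
  obtain ⟨fS, fC, fV⟩ := probs_fold L1 L2 H1 H2 c (pyGet2 dp c.1 c.2) hL1 hL2 hc ps dpB hwf s2S s2C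
  refine ⟨fS, ?_⟩
  intro v hv
  rw [fV v hv, s2V v hv, s1V v hv]
  unfold contribs
  rw [List.foldl_append, List.foldl_append]

theorem getD_of_get? (d : PySem.Dict (Int × Int) Int) (k : Int × Int) (v w : Int)
    (h : d.get? k = some v) : d.getD k w = v := by
  simp [PySem.Dict.getD_eq_get?_getD, h]

theorem mem_predAxis (i lo hi th rwd x : Int) (hile : i ≤ hi) (hr : 0 ≤ rwd) :
    x ∈ predAxis i lo hi th rwd ↔ (lo ≤ x ∧ th ≤ x ∧ x ≤ hi ∧ min hi (x + rwd) = i) := by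
  unfold predAxis
  split_ifs with h hcond
  · simp only [List.mem_singleton]
    constructor
    · rintro rfl; omega
    · rintro ⟨k1, k2, k3, k4⟩; omega
  · simp only [List.not_mem_nil, false_iff]
    rintro ⟨k1, k2, k3, k4⟩; omega
  · rw [PySem.List.mem_pyRange_one]; omega

-- the contribution list of one problem row in B's pull
def bElems (L1 L2 H1 H2 : Int) (val : PySem.Dict (Int × Int) Int) (c : Int × Int)
    (p : List Int) : List Int :=
  match p with
  | [algo, code, al, cd, cost] =>
    (predAxis c.1 L1 H1 algo al).flatMap (fun x =>
      (predAxis c.2 L2 H2 code cd).filterMap (fun y =>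
        if ¬((x, y) = c) then some (val.getD (x, y) (10^9) + cost) else none))
  | _ => []

theorem bProb_eq (L1 L2 H1 H2 : Int) (val : PySem.Dict (Int × Int) Int) (c : Int × Int)
    (best : Int) (p : List Int) :
    bProb L1 L2 H1 H2 c.1 c.2 val best p = (bElems L1 L2 H1 H2 val c p).foldl min best := by
  rcases p with _|⟨a1,_|⟨a2,_|⟨a3,_|⟨a4,_|⟨a5,_|⟨a6,t⟩⟩⟩⟩⟩⟩ <;>
    simp only [bProb, bElems, List.foldl_nil]
  rw [foldl_flat_min _ _ _ _ (fun s x hx => by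
    rw [foldl_if_min ((predAxis c.2 L2 H2 a2 a4)) s (fun y => ¬((x, y) = c))
      (fun y => val.getD (x, y) (10^9) + a5)])]

theorem mem_probContribs (H1 H2 : Int) (ps : List (List Int)) (b : Int) (u v : Int × Int)
    (z : Int) (hwf : Wf ps) :
    z ∈ probContribs H1 H2 ps b u v ↔
      ∃ a1 a2 a3 a4 a5, [a1,a2,a3,a4,a5] ∈ ps ∧ (a1 ≤ u.1 ∧ a2 ≤ u.2) ∧
        (min H1 (u.1+a3), min H2 (u.2+a4)) = v ∧ z = b + a5 := by
  unfold probContribs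
  rw [List.mem_filterMap]
  constructor
  · rintro ⟨p, hp, he⟩
    obtain ⟨a1, a2, a3, a4, a5, rfl⟩ := list5 p (hwf p hp).1
    simp only at he
    split_ifs at he with hcnd
    exact ⟨a1, a2, a3, a4, a5, hp, hcnd.1, hcnd.2, by injection he with h; omega⟩
  · rintro ⟨a1, a2, a3, a4, a5, hp, h1, h2, rfl⟩
    exact ⟨[a1,a2,a3,a4,a5], hp, by simp [h1, h2]⟩

theorem mem_bElems (L1 L2 H1 H2 : Int) (val : PySem.Dict (Int × Int) Int) (c : Int × Int)
    (p : List Int) (z : Int) (hp5 : p.length = 5) :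
    z ∈ bElems L1 L2 H1 H2 val c p ↔
      ∃ a1 a2 a3 a4 a5 x y, p = [a1,a2,a3,a4,a5] ∧
        x ∈ predAxis c.1 L1 H1 a1 a3 ∧ y ∈ predAxis c.2 L2 H2 a2 a4 ∧
        (x, y) ≠ c ∧ z = val.getD (x, y) (10^9) + a5 := by
  obtain ⟨a1, a2, a3, a4, a5, rfl⟩ := list5 p hp5
  simp only [bElems, List.mem_flatMap, List.mem_filterMap]
  constructor
  · rintro ⟨x, hx, y, hy, he⟩
    split_ifs at he with hcnd
    exact ⟨a1, a2, a3, a4, a5, x, y, rfl, hx, hy, hcnd, by injection he with h; omega⟩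
  · rintro ⟨b1, b2, b3, b4, b5, x, y, heq, hx, hy, hne, rfl⟩
    injection heq with e1 heq; injection heq with e2 heq; injection heq with e3 heq
    injection heq with e4 heq; injection heq with e5 _
    subst e1; subst e2; subst e3; subst e4; subst e5
    exact ⟨x, hx, y, hy, by simp [hne]⟩

theorem bBest_spec' (L1 L2 H1 H2 : Int) (ps problems : List (List Int))
    (val : PySem.Dict (Int × Int) Int) (f : Int × Int → Int) (P : List (Int × Int)) (c : Int × Int)
    (hmem : ∀ p : List Int, p ∈ ps ↔ p ∈ problems) (hwfp : Wf problems)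
    (hf : ∀ u ∈ P, val.get? u = some (f u))
    (hP : ∀ u, u ∈ P ↔ Rect L1 L2 H1 H2 u ∧ rmlt u c)
    (hc : Rect L1 L2 H1 H2 c) :
    bBest L1 L2 H1 H2 problems val c.1 c.2 = FF L1 L2 H1 H2 ps f P c := by
  obtain ⟨hcA, hcB, hcC, hcD⟩ := hc
  have hwf : Wf ps := fun p hp => hwfp p ((hmem p).mp hp)
  have hgd : ∀ u ∈ P, val.getD u (10^9) = f u := fun u hu => getD_of_get? val u _ _ (hf u hu)
  -- rewrite B's body as one min-fold
  have hLHS : bBest L1 L2 H1 H2 problems val c.1 c.2 =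
      ((if L1 < c.1 then [val.getD (c.1-1, c.2) (10^9) + 1] else []) ++
       (if L2 < c.2 then [val.getD (c.1, c.2-1) (10^9) + 1] else []) ++
       problems.flatMap (bElems L1 L2 H1 H2 val c)).foldl min (initV L1 L2 c) := by
    unfold bBest
    rw [foldl_flat_min _ _ _ _ (fun s p _ => bProb_eq L1 L2 H1 H2 val c s p)]
    rw [List.foldl_append, List.foldl_append]
    have hbase : (if c.1 = L1 ∧ c.2 = L2 then (0:Int) else 10^9) = initV L1 L2 c := by
      unfold initV
      by_cases h : c.1 = L1 ∧ c.2 = L2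
      · rw [if_pos h, if_pos (Prod.ext h.1 h.2)]
      · rw [if_neg h, if_neg (fun he => h ⟨congrArg Prod.fst he, congrArg Prod.snd he⟩)]
    rw [hbase]
    congr 1
    by_cases h1 : L1 < c.1 <;> by_cases h2 : L2 < c.2 <;>
      simp [h1, h2]
  rw [hLHS]
  unfold FF
  apply foldl_min_mem_equiv
  -- B's contributions are A's
  · intro z hz
    simp only [List.mem_append, List.mem_flatMap] at hz
    rw [List.mem_flatMap]
    rcases hz with (hz | hz) | hz
    · by_cases hg : L1 < c.1
      · rw [if_pos hg, List.mem_singleton] at hz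
        have huP : (c.1 - 1, c.2) ∈ P := (hP _).mpr ⟨⟨by omega, by omega, hcC, hcD⟩, Or.inl (by simp)⟩
        refine ⟨(c.1 - 1, c.2), huP, ?_⟩
        simp only [contribs, List.mem_append]
        left; left
        rw [if_pos ⟨by simp; omega, Prod.ext (by simp) (by simp)⟩, List.mem_singleton]
        rw [hz, hgd _ huP]
      · rw [if_neg hg] at hz; cases hz
    · by_cases hg : L2 < c.2
      · rw [if_pos hg, List.mem_singleton] at hz
        have huP : (c.1, c.2 - 1) ∈ P := (hP _).mpr ⟨⟨hcA, hcB, by omega, by omega⟩, Or.inr ⟨rfl, by simp⟩⟩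
        refine ⟨(c.1, c.2 - 1), huP, ?_⟩
        simp only [contribs, List.mem_append]
        left; right
        rw [if_pos ⟨by simp; omega, Prod.ext (by simp) (by simp)⟩, List.mem_singleton]
        rw [hz, hgd _ huP]
      · rw [if_neg hg] at hz; cases hz
    · obtain ⟨p, hp, hzp⟩ := hz
      obtain ⟨hp5, hpnn⟩ := hwfp p hp
      rw [mem_bElems L1 L2 H1 H2 val c p z hp5] at hzp
      obtain ⟨a1, a2, a3, a4, a5, x, y, rfl, hx, hy, hne, rfl⟩ := hzp
      have h3 : 0 ≤ a3 := hpnn _ (by simp)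
      have h4 : 0 ≤ a4 := hpnn _ (by simp)
      rw [mem_predAxis _ _ _ _ _ _ hcB h3] at hx
      rw [mem_predAxis _ _ _ _ _ _ hcD h4] at hy
      have hxc : x ≤ c.1 := by omega
      have hyc : y ≤ c.2 := by omega
      have hnec : ¬(x = c.1 ∧ y = c.2) := fun h => hne (Prod.ext h.1 h.2)
      have huP : (x, y) ∈ P := (hP _).mpr ⟨⟨hx.1, by omega, hy.1, by omega⟩, by
        unfold rmlt; simp only; omega⟩
      refine ⟨(x, y), huP, ?_⟩
      simp only [contribs, List.mem_append]
      right
      rw [mem_probContribs _ _ _ _ _ _ _ hwf]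
      exact ⟨a1, a2, a3, a4, a5, (hmem _).mpr hp, ⟨hx.2.1, hy.2.1⟩,
        Prod.ext (by simp [hx.2.2.2]) (by simp [hy.2.2.2]), by rw [hgd _ huP]⟩
  -- A's contributions are B's
  · intro z hz
    rw [List.mem_flatMap] at hz
    obtain ⟨u, huP, hzc⟩ := hz
    obtain ⟨⟨huA, huB, huC, huD⟩, hult⟩ := (hP u).mp huP
    obtain ⟨u1, u2⟩ := u
    simp only [List.mem_append]
    simp only [contribs, List.mem_append] at hzc
    rcases hzc with (hzc | hzc) | hzc
    · by_cases hg : u1 + 1 ≤ H1 ∧ c = (u1 + 1, u2)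
      · rw [if_pos hg, List.mem_singleton] at hzc
        left; left
        have hc1 : c.1 = u1 + 1 := by rw [hg.2]
        have hc2 : c.2 = u2 := by rw [hg.2]
        rw [if_pos (by omega), List.mem_singleton, hzc]
        rw [show (c.1 - 1, c.2) = (u1, u2) by rw [hc1, hc2]; simp]
        rw [hgd _ huP]
      · rw [if_neg hg] at hzc; cases hzc
    · by_cases hg : u2 + 1 ≤ H2 ∧ c = (u1, u2 + 1)
      · rw [if_pos hg, List.mem_singleton] at hzc
        left; right
        have hc1 : c.1 = u1 := by rw [hg.2]
        have hc2 : c.2 = u2 + 1 := by rw [hg.2]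
        rw [if_pos (by omega), List.mem_singleton, hzc]
        rw [show (c.1, c.2 - 1) = (u1, u2) by rw [hc1, hc2]; simp]
        rw [hgd _ huP]
      · rw [if_neg hg] at hzc; cases hzc
    · rw [mem_probContribs _ _ _ _ _ _ _ hwf] at hzc
      obtain ⟨a1, a2, a3, a4, a5, hrow, ⟨hth1, hth2⟩, htgt, rfl⟩ := hzc
      have hrowp : [a1,a2,a3,a4,a5] ∈ problems := (hmem _).mp hrow
      obtain ⟨_, hpnn⟩ := hwfp _ hrowp
      have h3 : 0 ≤ a3 := hpnn _ (by simp)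
      have h4 : 0 ≤ a4 := hpnn _ (by simp)
      right
      rw [List.mem_flatMap]
      refine ⟨[a1,a2,a3,a4,a5], hrowp, ?_⟩
      rw [mem_bElems _ _ _ _ _ _ _ _ (by simp)]
      have ht1 : min H1 (u1 + a3) = c.1 := congrArg Prod.fst htgt
      have ht2 : min H2 (u2 + a4) = c.2 := congrArg Prod.snd htgt
      have hnec : (u1, u2) ≠ c := by
        intro h
        have e1 : u1 = c.1 := congrArg Prod.fst h
        have e2 : u2 = c.2 := congrArg Prod.snd h
        unfold rmlt at hult; simp only at hult; omega
      exact ⟨a1, a2, a3, a4, a5, u1, u2, rfl,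
        (mem_predAxis _ _ _ _ _ _ hcB h3).mpr ⟨huA, hth1, huB, ht1⟩,
        (mem_predAxis _ _ _ _ _ _ hcD h4).mpr ⟨huC, hth2, huD, ht2⟩,
        hnec, by rw [hgd _ huP]⟩

theorem run_ind' (L1 L2 H1 H2 : Int) (ps problems : List (List Int))
    (hmem : ∀ p : List Int, p ∈ ps ↔ p ∈ problems) (hwfp : Wf problems) (hwf : Wf ps)
    (hL1 : 0 ≤ L1) (hL2 : 0 ≤ L2) :
    ∀ (suf P rest : List (Int × Int)) (dp : List (List Int))
      (val : PySem.Dict (Int × Int) Int) (f : Int × Int → Int),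
      cells L1 L2 H1 H2 = P ++ (suf ++ rest) →
      SweepInv L1 L2 H1 H2 ps P dp val f →
      ∃ f', (∀ u ∈ P, f' u = f u) ∧
        SweepInv L1 L2 H1 H2 ps (P ++ suf)
          (suf.foldl (fun dp c => aBody H1 H2 ps dp c.1 c.2) dp)
          (suf.foldl (fun val c => val.insert c (bBest L1 L2 H1 H2 problems val c.1 c.2)) val)
          f' := by
  intro suf
  induction suf with
  | nil =>
    intro P rest dp val f _ hInv
    exact ⟨f, fun u _ => rfl, by simpa using hInv⟩
  | cons c suf' ih =>
    intro P rest dp val f hsplit hInv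
    obtain ⟨hs, hfP, hgrid⟩ := hInv
    have hsplit' : cells L1 L2 H1 H2 = P ++ c :: (suf' ++ rest) := by
      rw [hsplit]; simp
    obtain ⟨hRc, hcnot, hPchar⟩ := split_cells L1 L2 H1 H2 P (suf' ++ rest) c hsplit'
    have hb := bBest_spec' L1 L2 H1 H2 ps problems val f P c hmem hwfp hfP hPchar hRc
    have hread : pyGet2 dp c.1 c.2 = bBest L1 L2 H1 H2 problems val c.1 c.2 := by
      rw [hgrid c hRc, hb]
    obtain ⟨aS, aV⟩ := aBody_spec' L1 L2 H1 H2 ps dp c hwf hs hL1 hL2 hRc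
    have hInv1 : SweepInv L1 L2 H1 H2 ps (P ++ [c])
        (aBody H1 H2 ps dp c.1 c.2)
        (val.insert c (bBest L1 L2 H1 H2 problems val c.1 c.2))
        (fun u => if u = c then bBest L1 L2 H1 H2 problems val c.1 c.2 else f u) := by
      refine ⟨aS, ?_, ?_⟩
      · intro u hu
        rw [List.mem_append, List.mem_singleton] at hu
        rcases hu with hu | rfl
        · have hne : u ≠ c := fun h => hcnot (h ▸ hu)
          dsimp only
          rw [PySem.Dict.get?_insert_of_ne val _ hne, hfP u hu, if_neg hne]
        · dsimp only
          rw [PySem.Dict.get?_insert_self, if_pos rfl]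
      · intro v hv
        rw [aV v hv, hread, hgrid v hv]
        rw [FF_congr L1 L2 H1 H2 ps f
              (fun u => if u = c then bBest L1 L2 H1 H2 problems val c.1 c.2 else f u) P v
              (fun u hu => by dsimp only; rw [if_neg (fun h : u = c => hcnot (h ▸ hu))])]
        rw [FF_snoc]
        simp
    have hsplit'' : cells L1 L2 H1 H2 = (P ++ [c]) ++ (suf' ++ rest) := by
      rw [hsplit]; simp
    obtain ⟨f2, hext2, hInv2⟩ := ih (P ++ [c]) rest _ _ _ hsplit'' hInv1
    refine ⟨f2, ?_, ?_⟩
    · intro u hu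
      rw [hext2 u (by simp [hu])]
      exact if_neg (fun h : u = c => hcnot (h ▸ hu))
    · simp only [List.foldl_cons]
      have : P ++ c :: suf' = (P ++ [c]) ++ suf' := by simp
      rw [this]
      exact hInv2

theorem contribs_last_ge (L1 L2 H1 H2 : Int) (ps : List (List Int)) (b : Int) (hwf : Wf ps)
    (z : Int) (hz : z ∈ contribs H1 H2 ps b (H1, H2) (H1, H2)) : b ≤ z := by
  simp only [contribs, List.mem_append] at hz
  rcases hz with (hz | hz) | hz
  · rw [if_neg (by simp)] at hz; cases hz
  · rw [if_neg (by simp)] at hz; cases hz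
  · rw [mem_probContribs _ _ _ _ _ _ _ hwf] at hz
    obtain ⟨a1, a2, a3, a4, a5, hrow, _, _, rfl⟩ := hz
    have h5 : 0 ≤ a5 := (hwf _ hrow).2 _ (by simp)
    omega


theorem foldl_fuse {σ : Type} (L1 L2 H1 H2 : Int) (g : σ → (Int × Int) → σ) (s0 : σ) :
    (PySem.List.pyRange L1 (H1+1) 1).foldl
      (fun s i => (PySem.List.pyRange L2 (H2+1) 1).foldl (fun s j => g s (i, j)) s) s0 =
    (cells L1 L2 H1 H2).foldl g s0 := by
  rw [cells, List.foldl_flatMap]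
  simp only [List.foldl_map]

theorem core_eq (L1 L2 H1 H2 : Int) (ps problems : List (List Int))
    (hmem : ∀ p : List Int, p ∈ ps ↔ p ∈ problems) (hwfp : Wf problems) (hwfs : Wf ps)
    (hL1 : 0 ≤ L1) (hL2 : 0 ≤ L2) (hL1le : L1 ≤ H1) (hL2le : L2 ≤ H2) :
    pyGet2 ((PySem.List.pyRange L1 (H1+1) 1).foldl
        (fun dp i => (PySem.List.pyRange L2 (H2+1) 1).foldl
          (fun dp j => aBody H1 H2 ps dp i j) dp)
        (pySet2 (List.replicate (H1+1).toNat (List.replicate (H2+1).toNat (10^9))) L1 L2 0)) H1 H2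
    = ((PySem.List.pyRange L1 (H1+1) 1).foldl
        (fun val i => (PySem.List.pyRange L2 (H2+1) 1).foldl
          (fun val j => val.insert (i, j) (bBest L1 L2 H1 H2 problems val i j)) val)
        (PySem.Dict.empty : PySem.Dict (Int × Int) Int)).getD (H1, H2) 0 := by
  -- fuse the nested loops into folds over the cell list
  have hA := foldl_fuse L1 L2 H1 H2 (fun dp c => aBody H1 H2 ps dp c.1 c.2)
    (pySet2 (List.replicate (H1+1).toNat (List.replicate (H2+1).toNat (10^9))) L1 L2 0)
  have hB := foldl_fuse L1 L2 H1 H2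
    (fun val c => val.insert c (bBest L1 L2 H1 H2 problems val c.1 c.2))
    (PySem.Dict.empty : PySem.Dict (Int × Int) Int)
  dsimp only at hA hB
  rw [hA, hB]
  -- split off the last cell
  have hcellsA : cells L1 L2 H1 H2 =
      ((PySem.List.pyRange L1 H1 1).flatMap
        (fun i => (PySem.List.pyRange L2 (H2+1) 1).map (fun j => (i, j))) ++
       (PySem.List.pyRange L2 H2 1).map (fun j => (H1, j))) ++ [(H1, H2)] := by
    rw [cells, PySem.List.pyRange_one_succ_right hL1le, List.flatMap_append,
        PySem.List.pyRange_one_succ_right hL2le]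
    simp
  set preL := (PySem.List.pyRange L1 H1 1).flatMap
        (fun i => (PySem.List.pyRange L2 (H2+1) 1).map (fun j => (i, j))) ++
       (PySem.List.pyRange L2 H2 1).map (fun j => (H1, j)) with hpreL
  -- the initial state satisfies the invariant
  have hs0 : Shape H1 H2 (pySet2 (List.replicate (H1+1).toNat (List.replicate (H2+1).toNat (10^9))) L1 L2 0) :=
    shape_pySet2 _ _ _ _ _ _ (shape_replicate H1 H2) hL1 (by omega) hL2
  have hInv0 : SweepInv L1 L2 H1 H2 ps []
      (pySet2 (List.replicate (H1+1).toNat (List.replicate (H2+1).toNat (10^9))) L1 L2 0)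
      (PySem.Dict.empty : PySem.Dict (Int × Int) Int) (fun _ => 0) := by
    refine ⟨hs0, by simp, ?_⟩
    intro v hv
    obtain ⟨hv1, hv2, hv3, hv4⟩ := rect_bounds L1 L2 H1 H2 v hv hL1 hL2
    unfold FF
    simp only [List.flatMap_nil, List.foldl_nil]
    rw [pyGet2_pySet2 H1 H2 L1 L2 v.1 v.2 0 _ (shape_replicate H1 H2) hL1 (by omega) hL2
      (by omega) hv1 hv2 hv3 hv4]
    unfold initV
    by_cases h : v = (L1, L2)
    · rw [if_pos ⟨by rw [h], by rw [h]⟩, if_pos h]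
    · rw [if_neg (fun hcomp => h (Prod.ext hcomp.1 hcomp.2)), if_neg h,
        pyGet2_replicate H1 H2 v.1 v.2 _ hv1 hv2 hv3 hv4]
  -- run the sweep over all cells but the last
  obtain ⟨f1, _, hInv1⟩ := run_ind' L1 L2 H1 H2 ps problems hmem hwfp hwfs hL1 hL2
    preL [] [(H1, H2)] _ _ _ (by rw [hcellsA]; simp) hInv0
  rw [List.nil_append] at hInv1
  obtain ⟨hs1, hdict1, hgrid1⟩ := hInv1
  -- the last cell
  obtain ⟨hRL, _, hLchar⟩ := split_cells L1 L2 H1 H2 preL [] (H1, H2) (by rw [hcellsA])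
  have hbL := bBest_spec' L1 L2 H1 H2 ps problems _ f1 preL (H1, H2) hmem hwfp hdict1 hLchar hRL
  obtain ⟨_, aV⟩ := aBody_spec' L1 L2 H1 H2 ps _ (H1, H2) hwfs hs1 hL1 hL2 hRL
  rw [hcellsA, List.foldl_concat, List.foldl_concat]
  have hAfin := aV (H1, H2) hRL
  dsimp only at hAfin hbL ⊢
  rw [hAfin]
  rw [foldl_min_eq_self _ _ (fun z hz => by
    rw [hgrid1 (H1, H2) hRL] at hz ⊢
    exact contribs_last_ge L1 L2 H1 H2 ps _ hwfs z hz)]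
  rw [hgrid1 (H1, H2) hRL, ← hbL]
  rw [getD_of_get? _ _ _ _ (PySem.Dict.get?_insert_self _ _ _)]

-- ===== VERDICT (by name: the statement is the Claim_ definition above) =====
theorem solution_spec : Claim_equal_solution := by
  intro alp cop problems _ hpre
  obtain ⟨hnil, halp, hcop, hrows⟩ := hpre
  unfold Spec_solution
  have hwfp : Wf problems := hrows
  have hperm : (PySem.List.sorted2 problems (fun x => PySem.List.pyGetD x 0 0)
      (fun x => PySem.List.pyGetD x 1 0) false).Perm problems :=
    PySem.List.sorted2_perm problems _ _ false
  have hmem : ∀ p : List Int, p ∈ (PySem.List.sorted2 problems (fun x => PySem.List.pyGetD x 0 0)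
      (fun x => PySem.List.pyGetD x 1 0) false) ↔ p ∈ problems := fun p => hperm.mem_iff
  have hwfs : Wf (PySem.List.sorted2 problems (fun x => PySem.List.pyGetD x 0 0)
      (fun x => PySem.List.pyGetD x 1 0) false) := fun p hp => hwfp p ((hmem p).mp hp)
  have hmax1 := max_getD_perm _ _ (hperm.map (fun p => PySem.List.pyGetD p 0 0))
  have hmax2 := max_getD_perm _ _ (hperm.map (fun p => PySem.List.pyGetD p 1 0))
  have hcol : ∀ p ∈ problems, 0 ≤ PySem.List.pyGetD p 0 0 ∧ 0 ≤ PySem.List.pyGetD p 1 0 := by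
    intro p hp
    obtain ⟨a1, a2, a3, a4, a5, rfl⟩ := list5 p (hwfp p hp).1
    have h1 : 0 ≤ a1 := (hwfp _ hp).2 _ (by simp)
    have h2 : 0 ≤ a2 := (hwfp _ hp).2 _ (by simp)
    constructor
    · rw [PySem.List.pyGetD_zero_cons]; exact h1
    · rw [show (1:Int) = ((1:Nat):Int) from rfl, PySem.List.pyGetD_natCast]
      simpa using h2
  have hH1 : 0 ≤ (PySem.List.max? (problems.map (fun p => PySem.List.pyGetD p 0 0)) (fun v => v)).getD 0 := by
    rcases o : PySem.List.max? (problems.map (fun p => PySem.List.pyGetD p 0 0)) (fun v => v) with _ | m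
    · simp
    · have hm := PySem.List.max?_mem o
      rw [List.mem_map] at hm
      obtain ⟨p, hp, rfl⟩ := hm
      simpa using (hcol p hp).1
  have hH2 : 0 ≤ (PySem.List.max? (problems.map (fun p => PySem.List.pyGetD p 1 0)) (fun v => v)).getD 0 := by
    rcases o : PySem.List.max? (problems.map (fun p => PySem.List.pyGetD p 1 0)) (fun v => v) with _ | m
    · simp
    · have hm := PySem.List.max?_mem o
      rw [List.mem_map] at hm
      obtain ⟨p, hp, rfl⟩ := hm
      simpa using (hcol p hp).2
  simp only [solution, solution_alt]
  rw [hmax1, hmax2]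
  exact core_eq _ _ _ _ _ problems hmem hwfp hwfs (by omega) (by omega) (by omega) (by omega)
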